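-- pv_equiv track=rewrite | github.com/arksap2002/fl-2021-hse-win | solution/parser/main.py | get_operator_name
-- ===== SOURCE A (Python) =====
-- def char_checking(ch):
--     if ch == '>':
--         return "&gt;"
--     if ch == '<':
--         return "&lt;"
--     if ch == '&':
--         return "&amp;"
--     if ch != ' ':
--         return ch
--     return ''
--
-- def get_operator_name(s):
--     result = ""
--     index = 0
--     while index < len(s) and s[index] != ' ':  # type
--         index += 1
--     while index < len(s) and s[index] == ' ':
--         index += 1
--     while index < len(s) and s[index] != ' ':  # operator
--         index += 1
--     while index < len(s) and s[index] == ' ':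
--         index += 1
--     while index < len(s) and s[index] != ' ' and s[index] != '(':
--         result += char_checking(s[index])
--         index += 1
--     return result
-- ===== SOURCE B (Python) =====
-- def get_operator_name(s):
--     # Skip the first two space-delimited fields (and the space runs after them).
--     for _ in range(2):
--         i = s.find(' ')
--         if i == -1:
--             return ''
--         s = s[i:].lstrip(' ')
--     # The third field ends at the first space or '('.
--     j = s.find(' ')
--     if j != -1:
--         s = s[:j]
--     j = s.find('(')
--     if j != -1:
--         s = s[:j]
--     esc = {'&': '&amp;', '<': '&lt;', '>': '&gt;'}
--     return ''.join(esc.get(ch, ch) for ch in s)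
-- ===== Notes on version B (the rewrite author's own statement) =====
-- stated objective: faster
-- what changed: B locates the third field with str.find/slicing/lstrip and escapes it in bulk via a dict-lookup join, instead of A's five index-based while loops appending one escaped char at a time.
import Mathlib
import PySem

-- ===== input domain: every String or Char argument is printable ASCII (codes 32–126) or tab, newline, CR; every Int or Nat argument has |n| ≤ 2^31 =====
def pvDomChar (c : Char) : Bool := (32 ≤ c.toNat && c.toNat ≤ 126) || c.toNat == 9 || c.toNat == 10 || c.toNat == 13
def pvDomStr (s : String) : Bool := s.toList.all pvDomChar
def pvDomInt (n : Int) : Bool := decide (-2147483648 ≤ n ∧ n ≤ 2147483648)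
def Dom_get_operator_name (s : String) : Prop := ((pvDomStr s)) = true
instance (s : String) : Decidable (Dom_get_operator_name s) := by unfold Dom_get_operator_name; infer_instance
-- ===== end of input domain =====

-- B replaces A's five index-based while loops by find/slice/lstrip field skipping plus a bulk
-- dict-lookup escape join (same O(n); measurably faster constants via C-level string ops).

-- ===== PORT A =====
-- char_checking(ch)
def pvCharChecking (ch : Char) : List Char :=
  if ch = '>' then "&gt;".toList
  else if ch = '<' then "&lt;".toList
  else if ch = '&' then "&amp;".toList
  else if ch ≠ ' ' then [ch]
  else []

-- while index < len(s) and s[index] != ' ': index += 1   (returns the suffix from index)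
def pvSkipNon : List Char → List Char
  | [] => []
  | c :: cs => if c ≠ ' ' then pvSkipNon cs else c :: cs

-- while index < len(s) and s[index] == ' ': index += 1
def pvSkipSp : List Char → List Char
  | [] => []
  | c :: cs => if c = ' ' then pvSkipSp cs else c :: cs

-- while index < len(s) and s[index] != ' ' and s[index] != '(': result += char_checking(s[index])
def pvCollect : List Char → List Char
  | [] => []
  | c :: cs => if c ≠ ' ' ∧ c ≠ '(' then pvCharChecking c ++ pvCollect cs else []

def get_operator_name (s : String) : String :=
  String.ofList (pvCollect (pvSkipSp (pvSkipNon (pvSkipSp (pvSkipNon s.toList)))))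

-- ===== PORT B =====
-- one iteration of Source B's for-loop: i = s.find(' '); if i == -1: return ''; s = s[i:].lstrip(' ')
-- (lstrip(' ') is ported by hand as dropWhile (· == ' '): exact, it removes leading ' ' only)
def pvBStep (t : List Char) : Option (List Char) :=
  let i := PySem.Chars.find t [' ']
  if i = -1 then none
  else some (List.dropWhile (fun c => c == ' ') (PySem.List.slice t (some i) none))

-- j = t.find(c); if j != -1: t = t[:j]
def pvBCut (t : List Char) (c : Char) : List Char :=
  let j := PySem.Chars.find t [c]
  if j ≠ -1 then PySem.List.slice t none (some j) else t

-- esc.get(ch, ch) with esc = {'&': '&amp;', '<': '&lt;', '>': '&gt;'}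
def pvBEsc (ch : Char) : List Char :=
  ((((PySem.Dict.empty.insert '&' "&amp;".toList).insert '<' "&lt;".toList).insert '>' "&gt;".toList :
    PySem.Dict Char (List Char)).getD ch [ch])

def get_operator_name_alt (s : String) : String :=
  match pvBStep s.toList with
  | none => ""
  | some t1 =>
    match pvBStep t1 with
    | none => ""
    | some t2 =>
      let t3 := pvBCut t2 ' '
      let t4 := pvBCut t3 '('
      String.ofList (t4.flatMap pvBEsc)

-- ===== PRECONDITION & SPEC =====
def Spec_get_operator_name (s : String) (out : String) : Prop := out = get_operator_name_alt s
instance (s : String) (out : String) : Decidable (Spec_get_operator_name s out) := by unfold Spec_get_operator_name; infer_instance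

-- ===== CLAIM (what is proved, stated in full; the proofs are below) =====
def Claim_equal_get_operator_name : Prop := ∀ (s : String), Dom_get_operator_name s → Spec_get_operator_name s (get_operator_name s)

-- ===== LEMMAS AND PROOFS =====

theorem pvSkipNon_eq (t : List Char) : pvSkipNon t = t.dropWhile (fun c => c != ' ') := by
  induction t with
  | nil => rfl
  | cons c cs ih => by_cases h : c = ' ' <;> simp [pvSkipNon, h, ih]

theorem pvSkipSp_eq (t : List Char) : pvSkipSp t = t.dropWhile (fun c => c == ' ') := by
  induction t with
  | nil => rfl
  | cons c cs ih => by_cases h : c = ' ' <;> simp [pvSkipSp, h, ih]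

theorem pvSkipNon_of_not_mem {t : List Char} (h : ' ' ∉ t) : pvSkipNon t = [] := by
  induction t with
  | nil => rfl
  | cons c cs ih =>
    simp only [List.mem_cons, not_or] at h
    simp [pvSkipNon, Ne.symm h.1, ih h.2]

-- the drop/take split at position n when p holds strictly before n and fails at n
theorem pvTakeDropWhile_at (p : Char → Bool) :
    ∀ (t : List Char) (n : Nat), (∀ i, (hi : i < t.length) → i < n → p t[i] = true) →
      ∀ (hn : n < t.length), p t[n] = false →
      t.takeWhile p = t.take n ∧ t.dropWhile p = t.drop n := by
  intro t
  induction t with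
  | nil => intro n _ hn; simp at hn
  | cons c cs ih =>
    intro n hall hn hfail
    cases n with
    | zero =>
      simp at hfail
      simp [List.takeWhile, List.dropWhile, hfail]
    | succ m =>
      have hc : p c = true := hall 0 (by simp) (by omega)
      have hm : m < cs.length := by simpa using hn
      obtain ⟨h1, h2⟩ := ih m (fun i hi hlt => hall (i + 1) (by simpa using hi) (by omega)) hm
        (by simpa using hfail)
      simp [List.takeWhile, List.dropWhile, hc, h1, h2]

-- where a single-character find points: takeWhile/dropWhile at the found index
theorem pvFind_single_spec {t : List Char} {c : Char} (h : c ∈ t) :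
    t.takeWhile (fun x => x != c) = t.take (PySem.Chars.find t [c]).toNat ∧
    t.dropWhile (fun x => x != c) = t.drop (PySem.Chars.find t [c]).toNat := by
  have hnn : 0 ≤ PySem.Chars.find t [c] :=
    (PySem.Chars.find_nonneg_iff t [c]).2 ((List.singleton_infix_iff c t).2 h)
  obtain ⟨hpre, hmin⟩ := PySem.Chars.find_spec hnn
  set n := (PySem.Chars.find t [c]).toNat with hn
  have hlt : n < t.length := by
    by_contra hge
    rw [List.drop_eq_nil_of_le (by omega)] at hpre
    simp at hpre
  have hat : t[n] = c := by
    rw [List.drop_eq_getElem_cons hlt] at hpre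
    obtain ⟨u, hu⟩ := hpre
    exact (List.cons.injEq _ _ _ _ ▸ hu).1.symm
  refine pvTakeDropWhile_at _ t n ?_ hlt (by simp [hat])
  intro i hi hilt
  have hmi := hmin i hilt
  rw [List.drop_eq_getElem_cons hi] at hmi
  by_contra hx
  simp only [bne_iff_ne, ne_eq, not_not] at hx
  exact hmi ⟨List.drop (i + 1) t, by simp [hx]⟩

theorem pvBStep_mem {t : List Char} (h : ' ' ∈ t) :
    pvBStep t = some (pvSkipSp (pvSkipNon t)) := by
  have hnn : 0 ≤ PySem.Chars.find t [' '] :=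
    (PySem.Chars.find_nonneg_iff t [' ']).2 ((List.singleton_infix_iff ' ' t).2 h)
  have hne : PySem.Chars.find t [' '] ≠ -1 := by omega
  rw [pvBStep]
  simp only [hne, if_false, PySem.List.slice_from t hnn]
  rw [← (pvFind_single_spec h).2, pvSkipSp_eq, pvSkipNon_eq]

theorem pvBStep_not_mem {t : List Char} (h : ' ' ∉ t) : pvBStep t = none := by
  have : PySem.Chars.find t [' '] = -1 :=
    (PySem.Chars.find_eq_neg_one_iff t [' ']).2 (fun hc => h ((List.singleton_infix_iff ' ' t).1 hc))
  simp [pvBStep, this]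

theorem pvBCut_eq (t : List Char) (c : Char) : pvBCut t c = t.takeWhile (fun x => x != c) := by
  by_cases h : c ∈ t
  · have hnn : 0 ≤ PySem.Chars.find t [c] :=
      (PySem.Chars.find_nonneg_iff t [c]).2 ((List.singleton_infix_iff c t).2 h)
    have hne : PySem.Chars.find t [c] ≠ -1 := by omega
    rw [pvBCut]
    rw [if_pos hne, PySem.List.slice_to t hnn]
    exact ((pvFind_single_spec h).1).symm
  · have : PySem.Chars.find t [c] = -1 :=
      (PySem.Chars.find_eq_neg_one_iff t [c]).2 (fun hc => h ((List.singleton_infix_iff c t).1 hc))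
    rw [pvBCut]
    simp only [this, ne_eq, not_true_eq_false, if_false]
    exact (List.takeWhile_eq_self_iff.2 (fun x hx => by
      simp only [bne_iff_ne, ne_eq]
      exact fun he => h (he ▸ hx))).symm

theorem pvCollect_eq (t : List Char) :
    pvCollect t = (t.takeWhile (fun x => x != ' ' && x != '(')).flatMap pvCharChecking := by
  induction t with
  | nil => rfl
  | cons c cs ih =>
    by_cases h1 : c = ' '
    · simp [pvCollect, h1]
    · by_cases h2 : c = '('
      · simp [pvCollect, h2]
      · simp [pvCollect, h1, h2, ih]

theorem pvBEsc_eq {c : Char} (h : c ≠ ' ') : pvBEsc c = pvCharChecking c := by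
  by_cases h1 : c = '>'
  · simp [pvBEsc, pvCharChecking, h1]
  · by_cases h2 : c = '<'
    · simp [pvBEsc, pvCharChecking, h2, PySem.Dict.getD_insert]
    · by_cases h3 : c = '&'
      · simp [pvBEsc, pvCharChecking, h3, PySem.Dict.getD_insert]
      · have e1 : ('>' == c) = false := by simpa using Ne.symm h1
        have e2 : ('<' == c) = false := by simpa using Ne.symm h2
        have e3 : ('&' == c) = false := by simpa using Ne.symm h3
        simp [pvBEsc, pvCharChecking, h1, h2, h3, h, PySem.Dict.getD, PySem.Dict.get?,
          PySem.Dict.empty, PySem.Dict.insert, List.find?, e1, e2, e3]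

-- on the suffix reached after two complete skips the two ports return the same characters
theorem pvTail_eq (t2 : List Char) :
    pvCollect t2 = ((pvBCut (pvBCut t2 ' ') '(').flatMap pvBEsc) := by
  rw [pvBCut_eq, pvBCut_eq, List.takeWhile_takeWhile, pvCollect_eq]
  have hpred : (fun x => x != ' ' && x != '(')
      = (fun a => decide ((a != '(') = true ∧ (a != ' ') = true)) := by
    funext x
    by_cases hx1 : x = ' ' <;> by_cases hx2 : x = '(' <;> simp [hx1, hx2]
  rw [← hpred]
  apply (List.flatMap_congr _).symm
  intro x hx
  have := List.mem_takeWhile_imp hx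
  simp only [Bool.and_eq_true, bne_iff_ne, ne_eq] at this
  exact pvBEsc_eq this.1

theorem get_operator_name_spec : Claim_equal_get_operator_name := by
  intro s _
  unfold Spec_get_operator_name get_operator_name get_operator_name_alt
  by_cases h1 : ' ' ∈ s.toList
  · rw [pvBStep_mem h1]
    dsimp only
    by_cases h2 : ' ' ∈ pvSkipSp (pvSkipNon s.toList)
    · rw [pvBStep_mem h2]
      dsimp only
      rw [pvTail_eq]
    · rw [pvBStep_not_mem h2]
      dsimp only
      rw [pvSkipNon_of_not_mem h2]
      rfl
  · rw [pvBStep_not_mem h1]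
    dsimp only
    rw [pvSkipNon_of_not_mem h1]
    rfl
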